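-- pv_equiv track=rewrite | github.com/KvPradeepthi/custom-csv-reader-writer | benchmark.py | generate_synthetic_data
-- ===== SOURCE A (Python) =====
-- from typing import List
--
-- def generate_synthetic_data(rows: int = 10_000, cols: int = 5) -> List[List[str]]:
--     """Generate reproducible CSV-like test data."""
--     data = []
--     for i in range(rows):
--         row = []
--         for j in range(cols):
--             if j == 0:
--                 row.append(f"row{i}_col{j}")
--             elif j == 1:
--                 row.append(f"value, with comma {i}-{j}")
--             elif j == 2:
--                 row.append(f"line1-{i}-{j}\nline2-{i}-{j}")
--             elif j == 3:
--                 row.append(f"plain{i}-{j}")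
--             else:
--                 row.append(f'with "quote" {i}-{j}')
--         data.append(row)
--     return data
-- ===== SOURCE B (Python) =====
-- from typing import List
--
--
-- def generate_synthetic_data(rows: int = 10_000, cols: int = 5) -> List[List[str]]:
--     """Generate reproducible CSV-like test data, built column-major:
--     one full column per format, then transposed back to row-major."""
--     if rows <= 0:
--         return []
--
--     def column(j: int) -> List[str]:
--         if j == 0:
--             return [f"row{i}_col0" for i in range(rows)]
--         if j == 1:
--             return [f"value, with comma {i}-1" for i in range(rows)]
--         if j == 2:
--             return [f"line1-{i}-2\nline2-{i}-2" for i in range(rows)]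
--         if j == 3:
--             return [f"plain{i}-3" for i in range(rows)]
--         return [f'with "quote" {i}-{j}' for i in range(rows)]
--
--     columns = [column(j) for j in range(cols)]
--     return [[col[i] for col in columns] for i in range(rows)]
-- ===== Notes on version B (the rewrite author's own statement) =====
-- stated objective: alternative
-- what changed: B builds the grid column-major (one whole column per format, picked once per j) and then transposes by index back to row-major, instead of A's row-major per-cell if/elif dispatch.
import Mathlib
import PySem

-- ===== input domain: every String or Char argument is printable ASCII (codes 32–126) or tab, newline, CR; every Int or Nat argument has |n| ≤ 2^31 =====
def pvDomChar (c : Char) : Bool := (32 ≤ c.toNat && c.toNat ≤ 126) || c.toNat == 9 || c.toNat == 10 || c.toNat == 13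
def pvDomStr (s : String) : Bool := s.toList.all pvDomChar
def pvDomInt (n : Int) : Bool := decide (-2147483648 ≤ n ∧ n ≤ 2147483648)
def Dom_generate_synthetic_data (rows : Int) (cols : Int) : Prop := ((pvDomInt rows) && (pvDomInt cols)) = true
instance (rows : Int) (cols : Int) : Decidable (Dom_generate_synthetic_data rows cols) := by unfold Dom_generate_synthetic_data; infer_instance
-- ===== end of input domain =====

-- B builds the grid column-major (one full column per format) and transposes by index, instead of A's row-major per-cell if/elif dispatch (objective: alternative).

-- ===== PORT A =====
-- the if/elif chain of A's inner loop, as a helper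
def pvCellA (i j : Int) : String :=
  if j = 0 then "row" ++ PySem.Int.toStr i ++ "_col" ++ PySem.Int.toStr j
  else if j = 1 then "value, with comma " ++ PySem.Int.toStr i ++ "-" ++ PySem.Int.toStr j
  else if j = 2 then "line1-" ++ PySem.Int.toStr i ++ "-" ++ PySem.Int.toStr j ++ "\nline2-" ++ PySem.Int.toStr i ++ "-" ++ PySem.Int.toStr j
  else if j = 3 then "plain" ++ PySem.Int.toStr i ++ "-" ++ PySem.Int.toStr j
  else "with \"quote\" " ++ PySem.Int.toStr i ++ "-" ++ PySem.Int.toStr j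

def generate_synthetic_data (rows : Int) (cols : Int) : List (List String) :=
  (PySem.List.pyRange 0 rows 1).foldl (fun data i =>
    data ++ [(PySem.List.pyRange 0 cols 1).foldl (fun row j => row ++ [pvCellA i j]) []]) []

-- ===== PORT B =====
-- Source B's `column(j)`: one whole column per format
def pvColumnB (rows : Int) (j : Int) : List String :=
  if j = 0 then (PySem.List.pyRange 0 rows 1).map (fun i => "row" ++ PySem.Int.toStr i ++ "_col0")
  else if j = 1 then (PySem.List.pyRange 0 rows 1).map (fun i => "value, with comma " ++ PySem.Int.toStr i ++ "-1")
  else if j = 2 then (PySem.List.pyRange 0 rows 1).map (fun i => "line1-" ++ PySem.Int.toStr i ++ "-2\nline2-" ++ PySem.Int.toStr i ++ "-2")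
  else if j = 3 then (PySem.List.pyRange 0 rows 1).map (fun i => "plain" ++ PySem.Int.toStr i ++ "-3")
  else (PySem.List.pyRange 0 rows 1).map (fun i => "with \"quote\" " ++ PySem.Int.toStr i ++ "-" ++ PySem.Int.toStr j)

-- col[i] in Source B's transpose: always in range (0 ≤ i < rows = col.length), so pyGetD's default is unreachable
def generate_synthetic_data_alt (rows : Int) (cols : Int) : List (List String) :=
  if rows ≤ 0 then []
  else
    let columns := (PySem.List.pyRange 0 cols 1).map (pvColumnB rows)
    (PySem.List.pyRange 0 rows 1).map (fun i => columns.map (fun col => PySem.List.pyGetD col i ""))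

-- ===== PRECONDITION & SPEC =====
def Spec_generate_synthetic_data (rows : Int) (cols : Int) (out : List (List String)) : Prop := out = generate_synthetic_data_alt rows cols
instance (rows : Int) (cols : Int) (out : List (List String)) : Decidable (Spec_generate_synthetic_data rows cols out) := by unfold Spec_generate_synthetic_data; infer_instance

-- ===== CLAIM (what is proved, stated in full; the proofs are below) =====
def Claim_equal_generate_synthetic_data : Prop := ∀ (rows : Int) (cols : Int), Dom_generate_synthetic_data rows cols → Spec_generate_synthetic_data rows cols (generate_synthetic_data rows cols)

-- ===== LEMMAS AND PROOFS =====

-- A is the row-major grid of pvCellA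
theorem pvA_grid (rows cols : Int) :
    generate_synthetic_data rows cols =
      (PySem.List.pyRange 0 rows 1).map (fun i => (PySem.List.pyRange 0 cols 1).map (fun j => pvCellA i j)) := by
  unfold generate_synthetic_data
  rw [PySem.List.foldl_append_singleton_eq_map]
  simp only [List.nil_append]
  apply List.map_congr_left
  intro i _
  rw [PySem.List.foldl_append_singleton_eq_map]
  simp

-- each of Source B's columns is the column of A's cells
theorem pvColumnB_eq (rows j : Int) :
    pvColumnB rows j = (PySem.List.pyRange 0 rows 1).map (fun i => pvCellA i j) := by
  have h0 : PySem.Int.toStr 0 = "0" := by decide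
  have h1 : PySem.Int.toStr 1 = "1" := by decide
  have h2 : PySem.Int.toStr 2 = "2" := by decide
  have h3 : PySem.Int.toStr 3 = "3" := by decide
  unfold pvColumnB pvCellA
  split_ifs with hj0 hj1 hj2 hj3 <;>
    subst_vars <;> simp [h0, h1, h2, h3, String.append_assoc]

-- indexing a column at a row index inside the range hits the cell
theorem pvColumnB_get (rows i j : Int) (h0 : 0 ≤ i) (hi : i < rows) :
    PySem.List.pyGetD (pvColumnB rows j) i "" = pvCellA i j := by
  rw [pvColumnB_eq]
  exact PySem.List.pyGetD_map_pyRange_of_nonneg _ rows i "" h0 hi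

-- ===== VERDICT (by name: the statement is the Claim_ definition above) =====
theorem generate_synthetic_data_spec : Claim_equal_generate_synthetic_data := by
  intro rows cols _
  show generate_synthetic_data rows cols = generate_synthetic_data_alt rows cols
  rw [pvA_grid]
  unfold generate_synthetic_data_alt
  by_cases hr : rows ≤ 0
  · rw [if_pos hr, show PySem.List.pyRange 0 rows 1 = [] from PySem.List.pyRange_one_eq_nil hr]
    rfl
  rw [if_neg hr]
  simp only [List.map_map]
  apply List.map_congr_left
  intro i hi
  have hmem := (PySem.List.mem_pyRange_one).mp hi
  apply List.map_congr_left
  intro j _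
  exact (pvColumnB_get rows i j hmem.1 hmem.2).symm
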